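-- pv_equiv track=rewrite | github.com/Simbamoureux/pymindiff | pymindiff/partitions.py | get_groups_column_from_partitions
-- ===== SOURCE A (Python) =====
-- def get_groups_column_from_partitions(partitions, data_length):
--     """
--     Transforms the partitions returned by set_partitions into vectors containing the group numbers
--
--     Parameters
--     ----------
--     partitions : list
--         list of partition values returned by the set_partitions function
--
--     data_length : int
--         Number of lines in the input dataframe
--
--     Returns
--     -------
--     list
--         A list containing all the groups column values corresponding to each partition
--     """
--     permutations_values = [[i for i in range(data_length)] for elem in partitions]
--     for i in range(len(partitions)):
--         for j in permutations_values[i]: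
--             value = permutations_values[i][j]
--             for k in range(len(partitions[i])):
--                 team = partitions[i][k]
--                 if value in team:
--                     permutations_values[i][j] = k
--     return permutations_values
-- ===== SOURCE B (Python) =====
-- def get_groups_column_from_partitions(partitions, data_length):
--     result = []
--     for partition in partitions:
--         column = list(range(data_length))
--         for k, team in enumerate(partition):
--             for member in team:
--                 if 0 <= member < data_length:
--                     column[member] = k
--         result.append(column)
--     return result
-- ===== Notes on version B (the rewrite author's own statement) =====
-- stated objective: simpler
-- what changed: Instead of scanning every group per index with a membership test (and mutating the row while iterating it), B scatters each group number directly onto the positions of its members, one pass over the partition structure; last group containing an index wins, as in A.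
import Mathlib
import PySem

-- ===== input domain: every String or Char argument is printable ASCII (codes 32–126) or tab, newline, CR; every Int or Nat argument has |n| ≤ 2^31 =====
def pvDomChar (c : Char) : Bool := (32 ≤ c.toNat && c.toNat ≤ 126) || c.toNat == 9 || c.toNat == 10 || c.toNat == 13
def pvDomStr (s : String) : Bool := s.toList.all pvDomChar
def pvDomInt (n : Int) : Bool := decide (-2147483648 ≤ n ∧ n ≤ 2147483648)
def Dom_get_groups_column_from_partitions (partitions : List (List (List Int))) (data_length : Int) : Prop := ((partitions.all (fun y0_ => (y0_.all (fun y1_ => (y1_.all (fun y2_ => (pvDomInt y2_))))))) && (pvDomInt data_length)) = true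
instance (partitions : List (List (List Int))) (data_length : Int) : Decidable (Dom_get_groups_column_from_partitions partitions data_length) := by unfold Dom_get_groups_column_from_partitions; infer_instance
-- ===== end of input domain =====

-- ===== PORT A =====
-- B changes the algorithm: A scans all groups per index with a membership test; B scatters group
-- numbers over member positions in one pass (objective: simpler). A = B proved on all inputs.

-- inner loop of A: 'for k in range(len(partitions[i])): team = partitions[i][k]; if value in team: row[j] = k'
def pvInnerA (teams : List (List Int)) (value : Int) (row : List Int) (j : Int) : List Int :=
  (PySem.List.enumerate teams 0).foldl
    (fun r kt => if value ∈ kt.2 then PySem.List.pySetD r j kt.1 else r) row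

-- 'for j in permutations_values[i]: value = permutations_values[i][j]; <inner>' — Python iterates the
-- (mutated) row by position; pySetD preserves the length, so the iteration is over positions 0..len-1.
-- The two 'none' fallbacks are where Python would raise IndexError; they are unreachable (each read
-- position holds its own index when the loop reaches it), so the fallback value is never observed.
def pvRowA (teams : List (List Int)) (row0 : List Int) : List Int :=
  (List.range row0.length).foldl
    (fun row idx =>
      match PySem.List.pyGet? row ((idx : Nat) : Int) with
      | none => row
      | some j =>
        match PySem.List.pyGet? row j with
        | none => row
        | some value => pvInnerA teams value row j)
    row0

-- rows are independent (iteration i only reads partitions[i] and mutates permutations_values[i]),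
-- so the outer 'for i in range(len(partitions))' is modelled row-wise over the initial list of ranges
def get_groups_column_from_partitions (partitions : List (List (List Int))) (data_length : Int) : List (List Int) :=
  let permutations_values := partitions.map (fun _ => PySem.List.pyRange 0 data_length 1)
  (permutations_values.zip partitions).map (fun rp => pvRowA rp.2 rp.1)

-- ===== PORT B =====
-- 'for member in team: if 0 <= member < data_length: column[member] = k' — under the guard the index
-- is nonnegative and in range, so List.set at member.toNat is exact
def pvScatterB (team : List Int) (k : Int) (data_length : Int) (col : List Int) : List Int :=
  team.foldl (fun c m => if 0 ≤ m ∧ m < data_length then c.set m.toNat k else c) col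

def get_groups_column_from_partitions_alt (partitions : List (List (List Int))) (data_length : Int) : List (List Int) :=
  partitions.map (fun partition =>
    (PySem.List.enumerate partition 0).foldl
      (fun col kt => pvScatterB kt.2 kt.1 data_length col)
      (PySem.List.pyRange 0 data_length 1))

-- ===== PRECONDITION & SPEC =====
def Spec_get_groups_column_from_partitions (partitions : List (List (List Int))) (data_length : Int) (out : List (List Int)) : Prop := out = get_groups_column_from_partitions_alt partitions data_length
instance (partitions : List (List (List Int))) (data_length : Int) (out : List (List Int)) : Decidable (Spec_get_groups_column_from_partitions partitions data_length out) := by unfold Spec_get_groups_column_from_partitions; infer_instance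

-- ===== CLAIM (what is proved, stated in full; the proofs are below) =====
def Claim_equal_get_groups_column_from_partitions : Prop := ∀ (partitions : List (List (List Int))) (data_length : Int), Dom_get_groups_column_from_partitions partitions data_length → Spec_get_groups_column_from_partitions partitions data_length (get_groups_column_from_partitions partitions data_length)

-- ===== LEMMAS AND PROOFS =====

-- the value at position v after scanning all (index, team) pairs: last index whose team contains v
def pvF (es : List (Int × List Int)) (v : Int) : Int :=
  es.foldl (fun acc kt => if v ∈ kt.2 then kt.1 else acc) v

theorem pv_set_getD (l : List Int) (j : Nat) (h : j < l.length) :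
    l.set j (l.getD j 0) = l := by
  apply List.ext_getElem?
  intro i
  rw [List.getElem?_set]
  split
  · next hij => subst hij; simp [List.getD_eq_getElem?_getD, List.getElem?_eq_getElem h]
  · rfl

theorem pv_innerA_gen (es : List (Int × List Int)) (v : Int) :
    ∀ (row : List Int) (j : Nat), j < row.length →
    es.foldl (fun r kt => if v ∈ kt.2 then PySem.List.pySetD r ((j : Nat) : Int) kt.1 else r) row
      = row.set j (es.foldl (fun acc kt => if v ∈ kt.2 then kt.1 else acc) (row.getD j 0)) := by
  induction es with
  | nil => intro row j h; simpa using (pv_set_getD row j h).symm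
  | cons kt rest ih =>
    intro row j h
    simp only [List.foldl_cons]
    by_cases hm : v ∈ kt.2
    · simp only [hm, if_pos]
      rw [PySem.List.pySetD_natCast, ih (row.set j kt.1) j (by simpa using h)]
      simp [List.set_set, List.getD_eq_getElem?_getD, List.getElem?_set_self (by simpa using h)]
    · simp only [hm, ite_false]
      exact ih row j h

theorem pv_innerA_eq (teams : List (List Int)) (v : Int) (row : List Int) (j : Nat)
    (h : j < row.length) (hv : row.getD j 0 = v) :
    pvInnerA teams v row ((j : Nat) : Int) = row.set j (pvF (PySem.List.enumerate teams 0) v) := by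
  unfold pvInnerA pvF
  rw [pv_innerA_gen _ v row j h, hv]

-- invariant of A's row loop: positions already visited hold pvF, the rest still hold their index
theorem pv_rowA_invariant (teams : List (List Int)) (n : Nat) :
    ∀ m, m ≤ n →
    (List.range m).foldl
      (fun row idx =>
        match PySem.List.pyGet? row ((idx : Nat) : Int) with
        | none => row
        | some j =>
          match PySem.List.pyGet? row j with
          | none => row
          | some value => pvInnerA teams value row j)
      ((List.range n).map (fun k : Nat => (k : Int)))
    = (List.range n).map (fun i : Nat => if i < m then pvF (PySem.List.enumerate teams 0) (i : Int) else (i : Int)) := by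
  intro m hm
  induction m with
  | zero =>
    simp only [List.range_zero, List.foldl_nil]
    apply List.map_congr_left; intro i _; simp
  | succ m ih =>
    have hm' : m ≤ n := Nat.le_of_succ_le hm
    rw [List.range_succ, List.foldl_append, ih hm', List.foldl_cons, List.foldl_nil]
    have hlen : ((List.range n).map (fun i : Nat => if i < m then pvF (PySem.List.enumerate teams 0) (i : Int) else (i : Int))).length = n := by simp
    have hmn : m < n := hm
    have hget : PySem.List.pyGet? ((List.range n).map (fun i : Nat => if i < m then pvF (PySem.List.enumerate teams 0) (i : Int) else (i : Int))) ((m : Nat) : Int) = some (m : Int) := by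
      rw [PySem.List.pyGet?_natCast]
      simp [List.getElem?_map, List.getElem?_range hmn]
    simp only [hget]
    have hgd : ((List.range n).map (fun i : Nat => if i < m then pvF (PySem.List.enumerate teams 0) (i : Int) else (i : Int))).getD m 0 = (m : Int) := by
      simp [List.getD_eq_getElem?_getD, List.getElem?_map, List.getElem?_range hmn]
    rw [pv_innerA_eq teams (m : Int) _ m (by simpa using hmn) hgd]
    apply List.ext_getElem (by simp)
    intro i h1 h2
    simp only [List.getElem_set, List.getElem_map, List.getElem_range] at *
    by_cases hi : i = m
    · subst hi; simp
    · have : ¬ m = i := fun h => hi h.symm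
      simp only [this, if_neg, not_false_iff]
      by_cases h3 : i < m
      · simp [h3, Nat.lt_succ_of_lt h3]
      · have : ¬ i < m + 1 := by omega
        simp [h3, this]

theorem pv_rowA_eq (teams : List (List Int)) (n : Nat) :
    pvRowA teams ((List.range n).map (fun k : Nat => (k : Int)))
      = (List.range n).map (fun i : Nat => pvF (PySem.List.enumerate teams 0) (i : Int)) := by
  unfold pvRowA
  have hlen : ((List.range n).map (fun k : Nat => (k : Int))).length = n := by simp
  rw [hlen, pv_rowA_invariant teams n n (le_refl n)]
  apply List.map_congr_left
  intro i hi
  simp [List.mem_range.mp hi]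

-- B-side: effect of scattering one team with group number k
theorem pv_scatter_getElem? (k dl : Int) :
    ∀ (team : List Int) (col : List Int) (i : Nat),
    (pvScatterB team k dl col)[i]? =
      if ((i : Int) ∈ team ∧ (i : Int) < dl ∧ i < col.length) then some k else col[i]? := by
  intro team
  induction team with
  | nil => intro col i; simp [pvScatterB]
  | cons m rest ih =>
    intro col i
    have step : pvScatterB (m :: rest) k dl col
        = pvScatterB rest k dl (if 0 ≤ m ∧ m < dl then col.set m.toNat k else col) := rfl
    rw [step]
    by_cases hg : 0 ≤ m ∧ m < dl
    · obtain ⟨hg1, hg2⟩ := hg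
      rw [if_pos ⟨hg1, hg2⟩, ih]
      rw [List.length_set]
      by_cases hrest : (i : Int) ∈ rest ∧ (i : Int) < dl ∧ i < col.length
      · rw [if_pos hrest, if_pos ⟨List.mem_cons_of_mem _ hrest.1, hrest.2⟩]
      · rw [if_neg hrest, List.getElem?_set]
        by_cases him : (i : Int) = m
        · have hti : m.toNat = i := by omega
          rw [if_pos hti, hti]
          by_cases hic : i < col.length
          · rw [if_pos hic, if_pos ⟨by simp [← him], by omega, hic⟩]
          · rw [if_neg hic, if_neg (by tauto), List.getElem?_eq_none (by omega)]
        · rw [if_neg (by omega), if_neg ?_]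
          rintro ⟨hmem2, hd, hc⟩
          rcases List.mem_cons.mp hmem2 with h | h
          · exact him h
          · exact hrest ⟨h, hd, hc⟩
    · rw [if_neg hg, ih]
      by_cases hrest : (i : Int) ∈ rest ∧ (i : Int) < dl ∧ i < col.length
      · rw [if_pos hrest, if_pos ⟨List.mem_cons_of_mem _ hrest.1, hrest.2⟩]
      · rw [if_neg hrest, if_neg ?_]
        rintro ⟨hmem2, hd, hc⟩
        rcases List.mem_cons.mp hmem2 with h | h
        · exact hg ⟨by omega, by omega⟩
        · exact hrest ⟨h, hd, hc⟩

theorem pv_rowB_eq (dl : Int) (es : List (Int × List Int)) :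
    es.foldl (fun col kt => pvScatterB kt.2 kt.1 dl col)
        ((List.range dl.toNat).map (fun k : Nat => (k : Int)))
      = (List.range dl.toNat).map (fun i : Nat => pvF es (i : Int)) := by
  induction es using List.reverseRecOn with
  | nil => simp [pvF]
  | append_singleton es kt ih =>
    rw [List.foldl_append, ih, List.foldl_cons, List.foldl_nil]
    apply List.ext_getElem?
    intro i
    rw [pv_scatter_getElem? kt.1 dl kt.2 _ i]
    by_cases hi : i < dl.toNat
    · have hdl : (i : Int) < dl := by omega
      by_cases hmem : (i : Int) ∈ kt.2
      · rw [if_pos ⟨hmem, hdl, by simpa using hi⟩]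
        simp [List.getElem?_map, List.getElem?_range hi, pvF, List.foldl_append, hmem]
      · rw [if_neg (by tauto)]
        simp [List.getElem?_map, List.getElem?_range hi, pvF, List.foldl_append, hmem]
    · rw [if_neg (fun h => hi (by simpa using h.2.2))]
      rw [List.getElem?_eq_none (by simp; omega), List.getElem?_eq_none (by simp; omega)]

theorem pv_zip_map_const {α β : Type} (c : β) (l : List α) :
    (l.map (fun _ => c)).zip l = l.map (fun p => (c, p)) := by
  induction l with
  | nil => rfl
  | cons x xs ih => simp only [List.map_cons, List.zip_cons_cons, ih]

theorem pv_pyRange_cast (dl : Int) :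
    PySem.List.pyRange 0 dl 1 = (List.range dl.toNat).map (fun k : Nat => (k : Int)) := by
  rw [PySem.List.pyRange_one]
  simp

-- ===== VERDICT (by name: the statement is the Claim_ definition above) =====
theorem get_groups_column_from_partitions_spec : Claim_equal_get_groups_column_from_partitions := by
  intro partitions data_length _
  unfold Spec_get_groups_column_from_partitions
  unfold get_groups_column_from_partitions get_groups_column_from_partitions_alt
  simp only [pv_zip_map_const, List.map_map, pv_pyRange_cast]
  apply List.map_congr_left
  intro part _
  simp only [Function.comp]
  rw [pv_rowA_eq part data_length.toNat, pv_rowB_eq data_length (PySem.List.enumerate part 0)]
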